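-- pv_equiv track=rewrite | github.com/lucky20160622/fim-one | scripts/translate.py | _shield_code_blocks
-- ===== SOURCE A (Python) =====
-- def _shield_code_blocks(text: str) -> tuple[str, list[str]]:
--     """Extract fenced code blocks, replacing with <!--CODE_BLOCK_N--> placeholders.
--
--     This prevents the LLM from translating or breaking code block content
--     (e.g. turning bash comments like '# Configure' into markdown headings).
--     """
--     blocks: list[str] = []
--     lines = text.splitlines(keepends=True)
--     result: list[str] = []
--     in_block = False
--     block_lines: list[str] = []
--     fence_char = ""
--
--     for line in lines:
--         stripped = line.strip()
--         if not in_block: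
--             if stripped.startswith("```") or stripped.startswith("~~~"):
--                 in_block = True
--                 fence_char = stripped[0]
--                 block_lines = [line]
--             else:
--                 result.append(line)
--         else:
--             block_lines.append(line)
--             # Closing fence: same char, at least 3, no other content
--             if stripped.startswith(fence_char * 3) and stripped.rstrip(fence_char) == "":
--                 blocks.append("".join(block_lines))
--                 result.append(f"<!--CODE_BLOCK_{len(blocks) - 1}-->\n")
--                 in_block = False
--                 block_lines = []
--
--     # Handle unclosed code block (shouldn't happen but be safe)
--     if block_lines:
--         blocks.append("".join(block_lines))
--         result.append(f"<!--CODE_BLOCK_{len(blocks) - 1}-->\n")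
--
--     return "".join(result), blocks
-- ===== SOURCE B (Python) =====
-- def _shield_code_blocks(text: str) -> tuple[str, list[str]]:
--     """Recursive segmentation: split the document into an alternating sequence of
--     plain-text runs and fenced blocks, assembling the output by concatenation."""
--     result, blocks = _segment(text.splitlines(keepends=True), 0)
--     return "".join(result), blocks
--
--
-- def _segment(lines: list[str], nblocks: int) -> tuple[list[str], list[str]]:
--     k = next((i for i, l in enumerate(lines) if l.strip()[:3] in ("```", "~~~")),
--              len(lines))
--     head, rest = lines[:k], lines[k:]
--     if not rest:
--         return head, []
--     f = rest[0].strip()[0]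
--     j = next((i for i in range(1, len(rest)) if _is_close(rest[i], f)),
--              len(rest) - 1)
--     tail_result, tail_blocks = _segment(rest[j + 1:], nblocks + 1)
--     return (head + [f"<!--CODE_BLOCK_{nblocks}-->\n"] + tail_result,
--             ["".join(rest[:j + 1])] + tail_blocks)
--
--
-- def _is_close(line: str, f: str) -> bool:
--     s = line.strip()
--     return len(s) >= 3 and set(s) == {f}
-- ===== Notes on version B (the rewrite author's own statement) =====
-- stated objective: alternative
-- what changed: Replaces A's single-pass in_block/fence-flag state machine by a recursive segmentation: the document is repeatedly split at the next opening fence (found by a search with default) and the matching closing fence (a second search with an end-of-input default), each segment's text run, placeholder and block being assembled by concatenation with the block number passed down the recursion.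
import Mathlib
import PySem

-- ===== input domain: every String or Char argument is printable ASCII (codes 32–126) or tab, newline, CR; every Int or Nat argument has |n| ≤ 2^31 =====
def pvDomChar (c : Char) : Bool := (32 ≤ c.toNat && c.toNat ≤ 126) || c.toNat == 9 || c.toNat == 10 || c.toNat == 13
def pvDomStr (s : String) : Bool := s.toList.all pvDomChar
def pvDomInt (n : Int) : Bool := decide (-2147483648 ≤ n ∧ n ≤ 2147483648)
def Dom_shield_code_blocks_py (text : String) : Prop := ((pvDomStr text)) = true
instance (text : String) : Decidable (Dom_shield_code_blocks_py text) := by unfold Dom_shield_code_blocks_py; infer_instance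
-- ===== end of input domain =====

-- B replaces A's single-pass in_block/fence state machine by a recursive segmentation:
-- the document is split into alternating text-run / fenced-block segments via searches
-- (first opening fence, first closing fence) and the output assembled by concatenation
-- (objective: alternative decomposition, same cost).


-- hand port of str.splitlines(keepends=True) (PySem.Chars.splitlines drops the ends):
-- exact on the Dom alphabet, whose only line-break characters are '\n', '\r', "\r\n"
def pySplitlinesKeep : List Char → List Char → List (List Char)
  | acc, [] => if acc = [] then [] else [acc.reverse]
  | acc, '\r' :: '\n' :: rest => (acc.reverse ++ ['\r', '\n']) :: pySplitlinesKeep [] rest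
  | acc, c :: rest =>
      if c = '\n' ∨ c = '\r' then (acc.reverse ++ [c]) :: pySplitlinesKeep [] rest
      else pySplitlinesKeep (c :: acc) rest

-- f"<!--CODE_BLOCK_{n}-->\n" (shared format string of both Pythons)
def pvPlaceholder (n : Int) : List Char :=
  "<!--CODE_BLOCK_".toList ++ (PySem.Int.toStr n).toList ++ "-->\n".toList

-- ===== PORT A =====
-- hand port of str.rstrip(f) for a single char f (PySem.Chars.stripChars strips both ends): exact
def pvRstripChar (cs : List Char) (f : Char) : List Char :=
  (cs.reverse.dropWhile (· == f)).reverse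

-- A's single loop over the lines with state (blocks, result, in_block, block_lines, fence_char)
def goA : List (List Char) → List (List Char) → List (List Char) → Bool → List (List Char) →
    Char → List (List Char) × List (List Char) × List (List Char)
  | [], blocks, result, _, bl, _ => (blocks, result, bl)
  | line :: rest, blocks, result, inb, bl, f =>
    let stripped := PySem.Chars.strip line
    if !inb then
      if PySem.Chars.startswith stripped "```".toList ||
          PySem.Chars.startswith stripped "~~~".toList then
        -- stripped[0]: stripped is nonempty here (it starts with a 3-char fence)
        goA rest blocks result true [line] (stripped.headD ' ')
      else
        goA rest blocks (result ++ [line]) inb bl f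
    else
      let bl' := bl ++ [line]
      if PySem.Chars.startswith stripped [f, f, f] && (pvRstripChar stripped f == []) then
        let blocks' := blocks ++ [PySem.Chars.join [] bl']
        goA rest blocks' (result ++ [pvPlaceholder ((blocks'.length : Int) - 1)]) false [] f
      else
        goA rest blocks result inb bl' f

def shield_code_blocks_py (text : String) : String × List String :=
  let lines := pySplitlinesKeep [] text.toList
  let st := goA lines [] [] false [] ' '
  -- if block_lines: flush the unclosed block
  let fin :=
    if st.2.2 ≠ [] then
      (st.1 ++ [PySem.Chars.join [] st.2.2],
       st.2.1 ++ [pvPlaceholder ((st.1.length + 1 : Int) - 1)])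
    else (st.1, st.2.1)
  (String.mk (PySem.Chars.join [] fin.2), fin.1.map String.mk)

-- ===== PORT B =====
-- Source B: l.strip()[:3] in ("```", "~~~")
def isOpenB (l : List Char) : Bool :=
  let s3 := (PySem.Chars.strip l).take 3
  (s3 == "```".toList) || (s3 == "~~~".toList)

-- Source B _is_close: len(s) >= 3 and set(s) == {f}  (set equality: nonempty, all chars = f)
def isCloseB (l : List Char) (f : Char) : Bool :=
  let s := PySem.Chars.strip l
  decide (3 ≤ s.length) && (!s.isEmpty && s.all (· == f))

-- port of next((i for i, l in enumerate(lines) if <open>), len(lines)): index of first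
-- opening fence, counting from i
def findOpenIdx : List (List Char) → Nat → Nat
  | [], i => i
  | l :: rest, i => if isOpenB l then i else findOpenIdx rest (i + 1)

-- port of next((i for i in range(1, len(rest)) if _is_close(rest[i], f)), len(rest) - 1):
-- scans ls (= rest[1:]) with running index i, default dflt
def findCloseIdx (f : Char) : List (List Char) → Nat → Nat → Nat
  | [], _, dflt => dflt
  | l :: rest, i, dflt => if isCloseB l f then i else findCloseIdx f rest (i + 1) dflt

-- Source B _segment: recursive segmentation into (result-pieces, blocks); slices lines[:k],
-- lines[k:], rest[:j+1], rest[j+1:] have in-range non-negative bounds, so take/drop are exact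
def segB (lines : List (List Char)) (nblocks : Nat) : List (List Char) × List (List Char) :=
  let k := findOpenIdx lines 0
  match h : lines.drop k with
  | [] => (lines.take k, [])
  | r0 :: rtail =>
    -- rest = r0 :: rtail; f = rest[0].strip()[0]
    let f := (PySem.Chars.strip r0).headD ' '
    let j := findCloseIdx f rtail 1 ((r0 :: rtail).length - 1)
    let t := segB ((r0 :: rtail).drop (j + 1)) (nblocks + 1)
    (lines.take k ++ [pvPlaceholder (nblocks : Int)] ++ t.1,
     PySem.Chars.join [] ((r0 :: rtail).take (j + 1)) :: t.2)
termination_by lines.length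
decreasing_by
  have hlen := congrArg List.length h
  simp at hlen ⊢
  omega

def shield_code_blocks_py_alt (text : String) : String × List String :=
  let lines := pySplitlinesKeep [] text.toList
  let q := segB lines 0
  (String.mk (PySem.Chars.join [] q.1), q.2.map String.mk)

-- ===== PRECONDITION & SPEC =====
def Spec_shield_code_blocks_py (text : String) (out : String × List String) : Prop := out = shield_code_blocks_py_alt text
instance (text : String) (out : String × List String) : Decidable (Spec_shield_code_blocks_py text out) := by unfold Spec_shield_code_blocks_py; infer_instance

-- ===== CLAIM (what is proved, stated in full; the proofs are below) =====
def Claim_equal_shield_code_blocks_py : Prop := ∀ (text : String), Dom_shield_code_blocks_py text → Spec_shield_code_blocks_py text (shield_code_blocks_py text)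

-- ===== LEMMAS AND PROOFS =====

-- A's final unclosed-block flush, as a function of goA's raw state, in (blocks, result) order
def finalizeA (st : List (List Char) × List (List Char) × List (List Char)) :
    List (List Char) × List (List Char) :=
  if st.2.2 ≠ [] then
    (st.1 ++ [PySem.Chars.join [] st.2.2],
     st.2.1 ++ [pvPlaceholder ((st.1.length + 1 : Int) - 1)])
  else (st.1, st.2.1)

-- A's opening test equals B's
theorem open_cond_eq (s : List Char) :
    (PySem.Chars.startswith s "```".toList || PySem.Chars.startswith s "~~~".toList) =
    ((s.take 3 == "```".toList) || (s.take 3 == "~~~".toList)) := by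
  have h : ∀ p : List Char, p.length = 3 →
      PySem.Chars.startswith s p = (s.take 3 == p) := by
    intro p hp
    rw [Bool.eq_iff_iff]
    simp only [PySem.Chars.startswith_iff, beq_iff_eq]
    rw [List.prefix_iff_eq_take, hp]
    constructor <;> (intro h; exact h.symm)
  rw [h _ rfl, h _ rfl]

theorem openA_eq_isOpenB (l : List Char) :
    (PySem.Chars.startswith (PySem.Chars.strip l) "```".toList ||
     PySem.Chars.startswith (PySem.Chars.strip l) "~~~".toList) = isOpenB l :=
  open_cond_eq (PySem.Chars.strip l)

-- A's closing test equals B's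
theorem close_cond_eq (s : List Char) (f : Char) :
    (PySem.Chars.startswith s [f, f, f] && (pvRstripChar s f == [])) =
    (decide (3 ≤ s.length) && (!s.isEmpty && s.all (· == f))) := by
  rw [Bool.eq_iff_iff]
  simp only [Bool.and_eq_true, PySem.Chars.startswith_iff, beq_iff_eq,
    pvRstripChar, List.reverse_eq_nil_iff, List.dropWhile_eq_nil_iff, List.mem_reverse,
    decide_eq_true_eq, Bool.not_eq_true', List.isEmpty_eq_false_iff, List.all_eq_true,
    beq_iff_eq]
  constructor
  · rintro ⟨hp, hall⟩
    have h3 : 3 ≤ s.length := by simpa using hp.length_le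
    refine ⟨h3, ?_, fun b hb => by simpa using hall b hb⟩
    intro hnil; rw [hnil] at h3; simp at h3
  · rintro ⟨h3, -, hall⟩
    refine ⟨?_, fun a ha => by simpa using hall a ha⟩
    have hs : s = List.replicate s.length f :=
      List.eq_replicate_iff.mpr ⟨rfl, fun b hb => hall b hb⟩
    rw [hs]
    have h33 : ([f, f, f] : List Char) = List.replicate 3 f := rfl
    rw [h33, List.prefix_iff_eq_take, List.take_replicate]
    congr 1
    simp only [List.length_replicate]
    omega

theorem closeA_eq_isCloseB (l : List Char) (f : Char) :
    (PySem.Chars.startswith (PySem.Chars.strip l) [f, f, f] &&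
      (pvRstripChar (PySem.Chars.strip l) f == [])) = isCloseB l f :=
  close_cond_eq (PySem.Chars.strip l) f

-- findOpenIdx counts from its start index
theorem findOpenIdx_shift (ls : List (List Char)) (i : Nat) :
    findOpenIdx ls i = i + findOpenIdx ls 0 := by
  induction ls generalizing i with
  | nil => simp [findOpenIdx]
  | cons l rest ih =>
    simp only [findOpenIdx]
    split
    · simp
    · rw [ih, ih 1]; omega

-- findCloseIdx in terms of findIdx?
theorem findCloseIdx_eq (f : Char) (ls : List (List Char)) (i dflt : Nat) :
    findCloseIdx f ls i dflt =
      match ls.findIdx? (fun l => isCloseB l f) with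
      | some m => i + m
      | none => dflt := by
  induction ls generalizing i with
  | nil => simp [findCloseIdx]
  | cons l rest ih =>
    simp only [findCloseIdx, List.findIdx?_cons]
    by_cases hc : isCloseB l f
    · simp [hc]
    · simp only [hc, if_false, Bool.false_eq_true]
      rw [ih]
      cases hfi : rest.findIdx? (fun l => isCloseB l f) with
      | none => simp
      | some m =>
        simp only [Option.map_some]
        show i + 1 + m = i + (m + 1)
        omega

-- in-block behaviour of A, characterised by the first closing line
theorem goA_inblock (f : Char) (ls : List (List Char)) :
    ∀ (bl blocks result : List (List Char)),
    goA ls blocks result true bl f =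
      match ls.findIdx? (fun l => isCloseB l f) with
      | some m =>
          goA (ls.drop (m + 1))
            (blocks ++ [PySem.Chars.join [] (bl ++ ls.take (m + 1))])
            (result ++ [pvPlaceholder (blocks.length : Int)]) false [] f
      | none => (blocks, result, bl ++ ls) := by
  induction ls with
  | nil => intro bl blocks result; simp [goA]
  | cons x xs ih =>
    intro bl blocks result
    simp only [goA, Bool.not_true, if_false, Bool.false_eq_true, List.findIdx?_cons]
    rw [closeA_eq_isCloseB]
    by_cases hc : isCloseB x f
    · simp [hc, List.length_append]
    · simp only [hc, if_false, Bool.false_eq_true]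
      rw [ih]
      cases hfi : xs.findIdx? (fun l => isCloseB l f) with
      | none => simp
      | some m => simp [List.append_assoc]

-- segB passes a non-opening head line straight to the output
theorem segB_cons_notOpen (l : List Char) (rest : List (List Char)) (nb : Nat)
    (hop : isOpenB l = false) :
    segB (l :: rest) nb = (l :: (segB rest nb).1, (segB rest nb).2) := by
  have hk : findOpenIdx (l :: rest) 0 = findOpenIdx rest 0 + 1 := by
    simp only [findOpenIdx, hop, Bool.false_eq_true, if_false]
    rw [findOpenIdx_shift]
    omega
  conv_lhs => rw [segB.eq_def]
  conv_rhs => rw [segB.eq_def]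
  simp only []
  split
  · next heq =>
      rw [hk, List.drop_succ_cons] at heq
      split
      · next heq2 => simp [hk]
      · next r0 rt heq2 => rw [heq] at heq2; cases heq2
  · next r0 rtail heq =>
      rw [hk, List.drop_succ_cons] at heq
      split
      · next heq2 => rw [heq] at heq2; cases heq2
      · next r0' rt' heq2 =>
          rw [heq] at heq2
          injection heq2 with h1 h2
          subst h1; subst h2
          simp [hk]

-- segB on a list opening a fence at index 0
theorem segB_cons_open (l : List Char) (rest : List (List Char)) (nb : Nat)
    (hop : isOpenB l = true) :
    segB (l :: rest) nb =
      (let f := (PySem.Chars.strip l).headD ' '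
       let j := findCloseIdx f rest 1 ((l :: rest).length - 1)
       let t := segB ((l :: rest).drop (j + 1)) (nb + 1)
       ([pvPlaceholder (nb : Int)] ++ t.1,
        PySem.Chars.join [] ((l :: rest).take (j + 1)) :: t.2)) := by
  have hk : findOpenIdx (l :: rest) 0 = 0 := by
    simp [findOpenIdx, hop]
  conv_lhs => rw [segB.eq_def]
  simp only []
  split
  · next heq => rw [hk] at heq; simp at heq
  · next r0 rtail heq =>
      rw [hk, List.drop_zero] at heq
      injection heq with h1 h2
      subst h1; subst h2
      simp [hk]

theorem segB_nil (nb : Nat) : segB ([] : List (List Char)) nb = ([], []) := by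
  rw [segB.eq_def]
  simp only []
  split
  · next heq => simp
  · next r0 rtail heq => simp at heq

-- main invariant: A's state machine (plus final flush) equals B's segmentation
theorem main_inv : ∀ (n : Nat) (lines : List (List Char)), lines.length ≤ n →
    ∀ (blocks result : List (List Char)) (f : Char),
    finalizeA (goA lines blocks result false [] f) =
      (blocks ++ (segB lines blocks.length).2, result ++ (segB lines blocks.length).1) := by
  intro n
  induction n with
  | zero =>
    intro lines hlen blocks result f
    have : lines = [] := List.eq_nil_of_length_eq_zero (Nat.le_zero.mp hlen)
    subst this
    simp [goA, finalizeA, segB_nil]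
  | succ n ih =>
    intro lines hlen blocks result f
    cases lines with
    | nil => simp [goA, finalizeA, segB_nil]
    | cons l rest =>
      simp only [goA, Bool.not_false, if_true]
      rw [openA_eq_isOpenB]
      by_cases hop : isOpenB l
      · -- opening fence at index 0
        simp only [hop, if_true]
        rw [goA_inblock]
        rw [segB_cons_open l rest blocks.length hop]
        simp only [findCloseIdx_eq]
        cases hfi : rest.findIdx? (fun x => isCloseB x ((PySem.Chars.strip l).headD ' ')) with
        | some m =>
          simp only []
          rw [Nat.add_comm 1 m]
          have hdrop : (rest.drop (m + 1)).length ≤ n := by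
            have h1 : rest.length ≤ n := by simpa using Nat.succ_le_succ_iff.mp hlen
            have := List.length_drop (l := rest) (i := m + 1)
            omega
          rw [ih _ hdrop]
          simp [List.length_append, List.append_assoc, List.drop_succ_cons, List.take_succ_cons]
        | none =>
          simp only []
          -- unclosed block: flushed by A, emitted by segB's default close index
          have hne : (l :: rest : List (List Char)) ≠ [] := by simp
          simp only [List.length_cons, Nat.add_sub_cancel]
          have hdropall : (l :: rest).drop (rest.length + 1) = [] := by simp
          have htake : (l :: rest).take (rest.length + 1) = l :: rest := by simp
          rw [hdropall, htake]
          rw [segB_nil]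
          simp [finalizeA]
      · -- ordinary line
        simp only [hop, if_false, Bool.false_eq_true]
        have hrest : rest.length ≤ n := by simpa using Nat.succ_le_succ_iff.mp hlen
        rw [ih _ hrest]
        rw [segB_cons_notOpen l rest blocks.length (by simpa using hop)]
        simp [List.append_assoc]

-- ===== VERDICT (by name: the statement is the Claim_ definition above) =====
theorem shield_code_blocks_py_spec : Claim_equal_shield_code_blocks_py := by
  intro text _
  unfold Spec_shield_code_blocks_py shield_code_blocks_py shield_code_blocks_py_alt
  have h := main_inv (pySplitlinesKeep [] text.toList).length _ le_rfl [] [] ' '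
  simp only [List.length_nil, List.nil_append] at h
  show (let fin := finalizeA (goA (pySplitlinesKeep [] text.toList) [] [] false [] ' ');
        (String.mk (PySem.Chars.join [] fin.2), fin.1.map String.mk)) = _
  rw [h]
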